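-- pv_equiv track=rewrite | github.com/miahuynhh/team-matcher | team_formation.py | validate_subteam
-- ===== SOURCE A (Python) =====
-- def validate_subteam(members, subteam_prefs):
--     """
--     Check if a group of netIDs forms a valid subteam.
--
--     A valid subteam requires that for each member M in the team:
--     - M's preference list contains exactly all other members (not including M themselves)
--
--     Args:
--         members: Set of netIDs
--         subteam_prefs: Dictionary mapping netID -> list of preferred team members
--
--     Returns:
--         bool: True if this is a valid subteam
--     """
--     members_set = set(members)
--
--     for member in members_set:
--         # Get this member's preferences
--         member_prefs = set(subteam_prefs.get(member, []))
--
--         # Their preferences should be exactly the other members (excluding themselves)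
--         expected_prefs = members_set - {member}
--
--         if member_prefs != expected_prefs:
--             return False
--
--     return True
-- ===== SOURCE B (Python) =====
-- def validate_subteam(members, subteam_prefs):
--     s = set(members)
--     actual = {(m, p) for m in s for p in subteam_prefs.get(m, [])}
--     return len(actual) == len(s) * (len(s) - 1) and all(
--         b in s and a != b for (a, b) in actual
--     )
-- ===== Notes on version B (the rewrite author's own statement) =====
-- stated objective: alternative
-- what changed: Replaces A's per-member set-equality loop with one flattened set of directed preference pairs, checked by counting: its size must be k*(k-1) and every pair must lie in the complete graph on the members.
import Mathlib
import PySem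

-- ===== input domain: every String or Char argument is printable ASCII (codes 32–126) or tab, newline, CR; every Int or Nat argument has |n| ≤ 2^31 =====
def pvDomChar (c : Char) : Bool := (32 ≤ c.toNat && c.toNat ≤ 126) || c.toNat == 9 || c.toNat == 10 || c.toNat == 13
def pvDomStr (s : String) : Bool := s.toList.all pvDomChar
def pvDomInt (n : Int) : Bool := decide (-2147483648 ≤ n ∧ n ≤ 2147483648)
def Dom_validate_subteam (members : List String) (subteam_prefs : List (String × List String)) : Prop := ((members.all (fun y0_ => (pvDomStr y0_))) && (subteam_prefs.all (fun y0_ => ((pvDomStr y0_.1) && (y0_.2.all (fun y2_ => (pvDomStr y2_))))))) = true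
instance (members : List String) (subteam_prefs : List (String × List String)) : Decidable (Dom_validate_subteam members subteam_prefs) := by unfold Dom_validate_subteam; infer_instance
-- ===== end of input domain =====

-- B changes the algorithm: instead of A's per-member loop comparing each member's
-- preference set with `members_set - {member}`, B builds one flattened set of directed
-- preference pairs and checks by counting that it is exactly the complete pair set
-- over the members (alternative decomposition).

-- shared primitive: subteam_prefs.get(member, [])
def pvGet (subteam_prefs : List (String × List String)) (m : String) : List String :=
  PySem.Dict.getD (PySem.Dict.mk subteam_prefs) m []

-- ===== PORT A =====
-- the 'for member in members_set: … return False … return True' loop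
def pvLoopA (S : PySem.Set String) (subteam_prefs : List (String × List String)) :
    List String → Bool
  | [] => true
  | m :: rest =>
      if PySem.Set.equal (PySem.Set.ofList (pvGet subteam_prefs m)) (PySem.Set.diff S [m])
      then pvLoopA S subteam_prefs rest
      else false

def validate_subteam (members : List String) (subteam_prefs : List (String × List String)) : Bool :=
  let members_set := PySem.Set.ofList members
  pvLoopA members_set subteam_prefs members_set

-- ===== PORT B =====
def validate_subteam_alt (members : List String) (subteam_prefs : List (String × List String)) : Bool :=
  let s := PySem.Set.ofList members
  let actual := PySem.Set.ofList
    (s.flatMap (fun m => (pvGet subteam_prefs m).map (fun p => (m, p))))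
  (PySem.Set.len actual == PySem.Set.len s * (PySem.Set.len s - 1)) &&
    actual.all (fun ab => PySem.Set.contains s ab.2 && !(ab.1 == ab.2))

-- ===== PRECONDITION & SPEC =====
def Spec_validate_subteam (members : List String) (subteam_prefs : List (String × List String)) (out : Bool) : Prop := out = validate_subteam_alt members subteam_prefs
instance (members : List String) (subteam_prefs : List (String × List String)) (out : Bool) : Decidable (Spec_validate_subteam members subteam_prefs out) := by unfold Spec_validate_subteam; infer_instance

-- ===== CLAIM (what is proved, stated in full; the proofs are below) =====
def Claim_equal_validate_subteam : Prop := ∀ (members : List String) (subteam_prefs : List (String × List String)), Dom_validate_subteam members subteam_prefs → Spec_validate_subteam members subteam_prefs (validate_subteam members subteam_prefs)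

-- ===== LEMMAS AND PROOFS =====
-- A's early-return loop is List.all of the per-member check
theorem pvLoopA_eq_all (S : PySem.Set String) (prefs : List (String × List String))
    (l : List String) :
    pvLoopA S prefs l = l.all (fun m =>
      PySem.Set.equal (PySem.Set.ofList (pvGet prefs m)) (PySem.Set.diff S [m])) := by
  induction l with
  | nil => rfl
  | cons m rest ih =>
      rw [List.all_cons, ← ih]
      conv_lhs => rw [pvLoopA]
      split_ifs with h <;> simp [h]

-- A returns true iff every member's preference set equals the other members
theorem validate_subteam_true_iff (members : List String)
    (prefs : List (String × List String)) :
    validate_subteam members prefs = true ↔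
      ∀ m ∈ members, ∀ x,
        x ∈ pvGet prefs m ↔ (x ∈ members ∧ x ≠ m) := by
  unfold validate_subteam
  rw [pvLoopA_eq_all, List.all_eq_true]
  constructor
  · intro h m hm x
    have := (PySem.Set.equal_iff _ _).mp (h m ((PySem.Set.mem_ofList _ _).mpr hm)) x
    simpa [PySem.Set.mem_ofList, PySem.Set.mem_diff] using this
  · intro h m hm
    rw [PySem.Set.equal_iff]
    intro x
    simpa [PySem.Set.mem_ofList, PySem.Set.mem_diff] using
      h m ((PySem.Set.mem_ofList _ _).mp hm) x

-- ghost lists used only by the proofs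
def pvActual (members : List String) (prefs : List (String × List String)) :
    List (String × String) :=
  (PySem.Set.ofList members).flatMap (fun m => (pvGet prefs m).map (fun p => (m, p)))

def pvE (members : List String) : List (String × String) :=
  (PySem.Set.ofList members).flatMap (fun a =>
    ((PySem.Set.ofList members).filter (fun b => !(a == b))).map (fun b => (a, b)))

theorem mem_pvActual (members : List String) (prefs : List (String × List String))
    (u v : String) :
    (u, v) ∈ pvActual members prefs ↔ u ∈ members ∧ v ∈ pvGet prefs u := by
  simp [pvActual, List.mem_flatMap, List.mem_map, PySem.Set.mem_ofList, eq_comm, And.comm]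

theorem mem_pvE (members : List String) (u v : String) :
    (u, v) ∈ pvE members ↔ u ∈ members ∧ v ∈ members ∧ u ≠ v := by
  simp only [pvE, List.mem_flatMap, List.mem_map, List.mem_filter, PySem.Set.mem_ofList]
  constructor
  · rintro ⟨a, ha, b, ⟨hb, hab⟩, heq⟩
    obtain ⟨rfl, rfl⟩ := Prod.mk.injEq .. ▸ heq
    refine ⟨ha, hb, ?_⟩
    simpa using hab
  · rintro ⟨hu, hv, huv⟩
    exact ⟨u, hu, v, ⟨hv, by simpa using huv⟩, rfl⟩

theorem nodup_pvE (members : List String) : (pvE members).Nodup := by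
  unfold pvE
  rw [List.nodup_flatMap]
  refine ⟨fun a _ => ?_, ?_⟩
  · exact (((PySem.Set.nodup_ofList members).filter _).map
      (fun x y h => by simpa using (Prod.mk.injEq .. ▸ h).2))
  · refine (PySem.Set.nodup_ofList members).imp ?_
    intro a b hab x hx hy
    simp only [List.mem_map, List.mem_filter] at hx hy
    obtain ⟨p, _, rfl⟩ := hx
    obtain ⟨q, _, heq⟩ := hy
    exact hab (Prod.mk.injEq .. ▸ heq).1.symm

theorem length_filter_ne (members : List String) (a : String) (ha : a ∈ PySem.Set.ofList members) :
    ((PySem.Set.ofList members).filter (fun b => !(a == b))).length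
      = (PySem.Set.ofList members).length - 1 := by
  have hnd := PySem.Set.nodup_ofList members
  have h1 : List.countP (fun b => a == b) (PySem.Set.ofList members) = 1 := by
    have hc : List.count a (PySem.Set.ofList members) = 1 :=
      List.count_eq_one_of_mem hnd ha
    rw [← hc, List.count]
    refine List.countP_congr ?_
    intro b _
    simp only [beq_iff_eq]
    exact eq_comm
  have h2 := List.length_eq_countP_add_countP (fun b => a == b)
    (l := PySem.Set.ofList members)
  have h3 : ((PySem.Set.ofList members).filter (fun b => !(a == b))).length
      = List.countP (fun a_1 => decide ¬((a == a_1) = true)) (PySem.Set.ofList members) := by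
    rw [List.countP_eq_length_filter]
    congr 1
    apply List.filter_congr
    intro b _
    rw [Bool.eq_iff_iff]
    simp
  omega

theorem length_pvE (members : List String) :
    (pvE members).length
      = (PySem.Set.ofList members).length * ((PySem.Set.ofList members).length - 1) := by
  unfold pvE
  rw [List.length_flatMap]
  have : (PySem.Set.ofList members).map
      (fun a => (((PySem.Set.ofList members).filter (fun b => !(a == b))).map
        (fun b => (a, b))).length)
      = (PySem.Set.ofList members).map (fun _ => (PySem.Set.ofList members).length - 1) := by
    apply List.map_congr_left
    intro a ha
    rw [List.length_map, length_filter_ne members a ha]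
  rw [this, List.map_const', List.sum_replicate, smul_eq_mul]

theorem pvCastIff (m k : Nat) :
    ((m : Int) = (k : Int) * ((k : Int) - 1)) ↔ m = k * (k - 1) := by
  cases k with
  | zero => simp
  | succ n =>
      have hn : (((n + 1 : Nat) : Int)) - 1 = (n : Int) := by push_cast; ring
      rw [Nat.succ_sub_one, hn]
      constructor <;> intro h <;> exact_mod_cast h

-- B returns true iff the same condition holds
theorem validate_subteam_alt_true_iff (members : List String)
    (prefs : List (String × List String)) :
    validate_subteam_alt members prefs = true ↔
      ∀ m ∈ members, ∀ x,
        x ∈ pvGet prefs m ↔ (x ∈ members ∧ x ≠ m) := by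
  have hred : validate_subteam_alt members prefs
      = ((PySem.Set.len (PySem.Set.ofList (pvActual members prefs)) ==
            PySem.Set.len (PySem.Set.ofList members)
              * (PySem.Set.len (PySem.Set.ofList members) - 1)) &&
          (PySem.Set.ofList (pvActual members prefs)).all
            (fun ab => (PySem.Set.ofList members).contains ab.2 && !(ab.1 == ab.2))) := rfl
  rw [hred, Bool.and_eq_true, beq_iff_eq, List.all_eq_true]
  have memA : ∀ u v, (u, v) ∈ PySem.Set.ofList (pvActual members prefs) ↔
      u ∈ members ∧ v ∈ pvGet prefs u := by
    intro u v
    rw [PySem.Set.mem_ofList, mem_pvActual]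
  have hndA : (PySem.Set.ofList (pvActual members prefs)).Nodup :=
    PySem.Set.nodup_ofList _
  have hlenS : PySem.Set.len (PySem.Set.ofList members)
      = ((PySem.Set.ofList members).length : Int) := rfl
  have hlenA : PySem.Set.len (PySem.Set.ofList (pvActual members prefs))
      = ((PySem.Set.ofList (pvActual members prefs)).length : Int) := rfl
  constructor
  · rintro ⟨hlen, hall⟩
    -- actual ⊆ pvE and equal cardinalities ⇒ same members
    have hsub : (PySem.Set.ofList (pvActual members prefs)).toFinset ⊆
        (pvE members).toFinset := by
      intro x hx
      obtain ⟨u, v⟩ := x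
      rw [List.mem_toFinset] at hx ⊢
      have hm := (memA u v).mp hx
      have hv := hall (u, v) hx
      simp only [Bool.and_eq_true, PySem.Set.contains_iff, PySem.Set.mem_ofList,
        Bool.not_eq_eq_eq_not, Bool.not_true, beq_eq_false_iff_ne] at hv
      exact (mem_pvE members u v).mpr ⟨hm.1, hv.1, hv.2⟩
    have hcardA : (PySem.Set.ofList (pvActual members prefs)).toFinset.card
        = (PySem.Set.ofList (pvActual members prefs)).length :=
      List.toFinset_card_of_nodup hndA
    have hcardE : (pvE members).toFinset.card = (pvE members).length :=
      List.toFinset_card_of_nodup (nodup_pvE members)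
    have hlenA' : (PySem.Set.ofList (pvActual members prefs)).length
        = (PySem.Set.ofList members).length * ((PySem.Set.ofList members).length - 1) := by
      rw [hlenA, hlenS] at hlen
      exact (pvCastIff _ _).mp hlen
    have heq : (PySem.Set.ofList (pvActual members prefs)).toFinset
        = (pvE members).toFinset := by
      apply Finset.eq_of_subset_of_card_le hsub
      rw [hcardA, hcardE, hlenA', length_pvE]
    have hmem : ∀ x, x ∈ PySem.Set.ofList (pvActual members prefs) ↔ x ∈ pvE members := by
      intro x
      rw [← List.mem_toFinset, ← List.mem_toFinset, heq]
    intro m hm x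
    have h1 := (hmem (m, x)).symm.trans (memA m x)
    rw [mem_pvE] at h1
    constructor
    · intro hx
      have := h1.mpr ⟨hm, hx⟩
      exact ⟨this.2.1, fun h' => this.2.2 h'.symm⟩
    · intro ⟨hx, hne⟩
      exact (h1.mp ⟨hm, hx, fun h' => hne h'.symm⟩).2
  · intro h
    have hmem : ∀ x, x ∈ PySem.Set.ofList (pvActual members prefs) ↔ x ∈ pvE members := by
      rintro ⟨u, v⟩
      rw [memA, mem_pvE]
      constructor
      · rintro ⟨hu, hv⟩
        have := (h u hu v).mp hv
        exact ⟨hu, this.1, fun h' => this.2 h'.symm⟩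
      · rintro ⟨hu, hv, huv⟩
        exact ⟨hu, (h u hu v).mpr ⟨hv, fun h' => huv h'.symm⟩⟩
    have hperm : (PySem.Set.ofList (pvActual members prefs)).Perm (pvE members) :=
      (List.perm_ext_iff_of_nodup hndA (nodup_pvE members)).mpr hmem
    constructor
    · rw [hlenA, hlenS, pvCastIff, hperm.length_eq, length_pvE]
    · intro ab hab
      obtain ⟨u, v⟩ := ab
      have := (mem_pvE members u v).mp ((hmem (u, v)).mp hab)
      simp only [Bool.and_eq_true, PySem.Set.contains_iff, PySem.Set.mem_ofList,
        Bool.not_eq_eq_eq_not, Bool.not_true, beq_eq_false_iff_ne]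
      exact ⟨this.2.1, this.2.2⟩

-- ===== VERDICT (by name: the statement is the Claim_ definition above) =====
theorem validate_subteam_spec : Claim_equal_validate_subteam := by
  intro members prefs _
  unfold Spec_validate_subteam
  rw [Bool.eq_iff_iff, validate_subteam_true_iff, validate_subteam_alt_true_iff]
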